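-- pv_equiv track=rewrite | github.com/thtra-TT/BaiTap_ | UI_8_Quan_Xe.py | hill_climbing_timkiem
-- ===== SOURCE A (Python) =====
-- SO_HANG = 8
--
-- def hill_climbing_timkiem(dich):
--     target_cols = [c for (_, c) in sorted(dich, key=lambda x: x[0])]
--
--     def heuristic_hc(state):
--         return sum(1 for r, c in state if c == target_cols[r])
--
--     state = []
--     used = set()
--     buoc = [state.copy()]
--
--     for r in range(SO_HANG):
--         best_move = None
--         best_h = -1
--
--         for c in range(SO_HANG):
--             if c not in used:
--                 new_state = state + [(r, c)]
--                 h_val = heuristic_hc(new_state)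
--                 if h_val > best_h:
--                     best_h = h_val
--                     best_move = (r, c)
--
--         if best_move is None:
--             break
--
--         state.append(best_move)
--         used.add(best_move[1])
--         buoc.append(state.copy())
--
--         if [col for _, col in state] == target_cols:
--             return [state[:k] for k in range(len(state)+1)]
--
--     return buoc
-- ===== SOURCE B (Python) =====
-- SO_HANG = 8
--
-- def hill_climbing_timkiem(dich):
--     # Direct per-row selection: place the row's target column when it is a
--     # legal unused column, otherwise the smallest unused column.
--     target_cols = [c for (_, c) in sorted(dich, key=lambda x: x[0])]
--
--     state = []
--     used = set()
--     buoc = [[]]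
--
--     for r in range(SO_HANG):
--         if [c for _, c in state] == target_cols:
--             return buoc
--         t = target_cols[r]
--         col = t if (0 <= t < SO_HANG and t not in used) else min(
--             c for c in range(SO_HANG) if c not in used)
--         state.append((r, col))
--         used.add(col)
--         buoc.append(state.copy())
--
--     return buoc
-- ===== Notes on version B (the rewrite author's own statement) =====
-- stated objective: simpler
-- what changed: A's inner hill-climbing loop that scores all 8 candidate columns with a heuristic recomputed over the whole partial state is replaced by a direct per-row selection (the row's target column if it is a legal unused column, else the smallest unused column), and the early-completion branch returning a prefix list is unified with the normal trace return; Pre_ excludes exactly the inputs (empty or short boards with an unmatchable column multiset) on which A raises IndexError.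
import Mathlib
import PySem

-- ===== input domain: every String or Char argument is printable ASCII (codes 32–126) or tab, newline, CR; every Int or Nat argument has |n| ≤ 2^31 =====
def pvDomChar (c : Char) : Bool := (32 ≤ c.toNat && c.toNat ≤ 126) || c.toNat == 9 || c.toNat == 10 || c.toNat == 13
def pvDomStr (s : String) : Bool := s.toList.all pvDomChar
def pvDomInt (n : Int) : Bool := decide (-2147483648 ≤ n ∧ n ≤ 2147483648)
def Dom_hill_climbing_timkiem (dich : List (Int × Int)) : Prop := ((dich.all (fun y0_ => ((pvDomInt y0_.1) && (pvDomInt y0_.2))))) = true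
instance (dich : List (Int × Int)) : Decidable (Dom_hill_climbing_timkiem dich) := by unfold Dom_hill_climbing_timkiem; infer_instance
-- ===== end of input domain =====

-- B replaces A's inner hill-climbing maximization over all 8 columns by a direct per-row
-- choice (the row's target column if legal and unused, else the smallest unused column).

-- ===== PORT A =====
-- heuristic_hc(state): where Python would raise IndexError (target_cols[r] out of range)
-- this port counts 0 for that pair; that point is unreachable on inputs admitted by Pre_.
def pvHeurA (tc : List Int) (state : List (Int × Int)) : Int :=
  state.foldl (fun acc p =>
    acc + (match PySem.List.pyGet? tc p.1 with
           | some t => if p.2 = t then (1 : Int) else 0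
           | none => 0)) 0

def pvStepA (tc : List Int) (state : List (Int × Int)) (used : PySem.Set Int) (r : Int)
    (acc : Option (Int × Int) × Int) (c : Int) : Option (Int × Int) × Int :=
  if used.contains c then acc
  else if acc.2 < pvHeurA tc (state ++ [(r, c)]) then (some (r, c), pvHeurA tc (state ++ [(r, c)]))
  else acc

def pvInnerA (tc : List Int) (state : List (Int × Int)) (used : PySem.Set Int) (r : Int) :
    Option (Int × Int) × Int :=
  (PySem.List.pyRange 0 8 1).foldl (pvStepA tc state used r) (none, -1)

def pvLoopA (tc : List Int) :
    List Int → List (Int × Int) → PySem.Set Int → List (List (Int × Int)) → List (List (Int × Int))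
  | [], _, _, buoc => buoc
  | r :: rs, state, used, buoc =>
    match (pvInnerA tc state used r).1 with
    | none => buoc
    | some mv =>
      let state' := state ++ [mv]
      let used' := used.add mv.2
      let buoc' := buoc ++ [state']
      if state'.map (fun p => p.2) = tc then
        (PySem.List.pyRange 0 ((state'.length : Int) + 1) 1).map
          (fun k => PySem.List.slice state' none (some k))
      else pvLoopA tc rs state' used' buoc'

def hill_climbing_timkiem (dich : List (Int × Int)) : List (List (Int × Int)) :=
  let tc := (PySem.List.sorted dich (fun x => x.1) false).map (fun p => p.2)
  pvLoopA tc (PySem.List.pyRange 0 8 1) [] PySem.Set.empty [[]]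

-- ===== PORT B =====
-- min(c for c in range(8) if c not in used); Python raises ValueError on an empty
-- generator — B only calls this with at least one unused column, the 0 is unreachable.
def pvMinUnusedB (used : PySem.Set Int) : Int :=
  match PySem.List.min? ((PySem.List.pyRange 0 8 1).filter (fun c => !used.contains c)) (fun x => x) with
  | some m => m
  | none => 0

def pvLoopB (tc : List Int) :
    List Int → List (Int × Int) → PySem.Set Int → List (List (Int × Int)) → List (List (Int × Int))
  | [], _, _, buoc => buoc
  | r :: rs, state, used, buoc =>
    if state.map (fun p => p.2) = tc then buoc
    else
      match PySem.List.pyGet? tc r with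
      | none => buoc   -- Python raises IndexError here; unreachable on inputs admitted by Pre_
      | some t =>
        let col := if 0 ≤ t ∧ t < 8 ∧ used.contains t = false then t else pvMinUnusedB used
        let state' := state ++ [(r, col)]
        pvLoopB tc rs state' (used.add col) (buoc ++ [state'])

def hill_climbing_timkiem_alt (dich : List (Int × Int)) : List (List (Int × Int)) :=
  let tc := (PySem.List.sorted dich (fun x => x.1) false).map (fun p => p.2)
  pvLoopB tc (PySem.List.pyRange 0 8 1) [] PySem.Set.empty [[]]

-- ===== PRECONDITION & SPEC =====
-- Pre_ excludes exactly the inputs on which the Python A raises IndexError: fewer than 8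
-- queens whose column multiset cannot be matched exactly (empty, a duplicate, or an
-- out-of-range column) makes A run past the end of target_cols.
def Pre_hill_climbing_timkiem (dich : List (Int × Int)) : Prop :=
  8 ≤ dich.length ∨
    (dich ≠ [] ∧ (∀ p ∈ dich, 0 ≤ p.2 ∧ p.2 < 8) ∧ (dich.map (fun p => p.2)).Nodup)
instance (dich : List (Int × Int)) : Decidable (Pre_hill_climbing_timkiem dich) := by
  unfold Pre_hill_climbing_timkiem; infer_instance

def pvWitness_hill_climbing_timkiem : (List (Int × Int)) := [(0, 2), (1, 0)]

def Spec_hill_climbing_timkiem (dich : List (Int × Int)) (out : List (List (Int × Int))) : Prop := out = hill_climbing_timkiem_alt dich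
instance (dich : List (Int × Int)) (out : List (List (Int × Int))) : Decidable (Spec_hill_climbing_timkiem dich out) := by unfold Spec_hill_climbing_timkiem; infer_instance

-- ===== CLAIM (what is proved, stated in full; the proofs are below) =====
def Claim_equal_hill_climbing_timkiem : Prop := ∀ (dich : List (Int × Int)), Dom_hill_climbing_timkiem dich → Pre_hill_climbing_timkiem dich → Spec_hill_climbing_timkiem dich (hill_climbing_timkiem dich)

-- ===== LEMMAS AND PROOFS =====

-- the list of prefixes of a state; A's buoc always has this shape
def pvPrefixes (s : List (Int × Int)) : List (List (Int × Int)) :=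
  (List.range (s.length + 1)).map (fun i => s.take i)

lemma pvPrefixes_append (s : List (Int × Int)) (x : Int × Int) :
    pvPrefixes (s ++ [x]) = pvPrefixes s ++ [s ++ [x]] := by
  unfold pvPrefixes
  rw [List.length_append, List.length_singleton]
  rw [show s.length + 1 + 1 = (s.length + 1) + 1 from rfl, List.range_succ]
  rw [List.map_append]
  congr 1
  · apply List.map_congr_left
    intro i hi
    simp at hi
    rw [List.take_append_of_le_length (by omega)]
  · simp

lemma pvEarlyRet_eq (s : List (Int × Int)) :
    (PySem.List.pyRange 0 ((s.length : Int) + 1) 1).map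
      (fun k => PySem.List.slice s none (some k)) = pvPrefixes s := by
  unfold pvPrefixes
  rw [show ((s.length : Int) + 1) = ((s.length + 1 : Nat) : Int) by push_cast; ring]
  rw [PySem.List.pyRange_one]
  rw [List.map_map]
  apply List.map_congr_left
  intro i hi
  simp only [Function.comp]
  rw [show ((0:Int) + (i:Int)) = ((i:Nat):Int) by ring]
  exact PySem.List.slice_to_natCast s i

lemma pvHeurA_append (tc : List Int) (state : List (Int × Int)) (r c : Int) :
    pvHeurA tc (state ++ [(r, c)]) =
      pvHeurA tc state +
        (match PySem.List.pyGet? tc r with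
         | some t => if c = t then (1 : Int) else 0
         | none => 0) := by
  unfold pvHeurA
  rw [List.foldl_append]
  simp

lemma pvHeurA_nonneg (tc : List Int) (state : List (Int × Int)) :
    0 ≤ pvHeurA tc state := by
  unfold pvHeurA
  have h : ∀ (l : List (Int × Int)) (i : Int), i ≤ l.foldl (fun acc p =>
      acc + (match PySem.List.pyGet? tc p.1 with
             | some t => if p.2 = t then (1 : Int) else 0
             | none => 0)) i := by
    intro l
    induction l with
    | nil => intro i; simp
    | cons p l ih =>
      intro i
      simp only [List.foldl_cons]
      refine le_trans ?_ (ih _)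
      rcases PySem.List.pyGet? tc p.1 with _ | t <;> simp
      split <;> omega
  exact h state 0

-- fold absorbs once the accumulator reaches base + 1
lemma pvHeurA_append' (tc : List Int) (state : List (Int × Int)) (r c t : Int)
    (hget : PySem.List.pyGet? tc r = some t) :
    pvHeurA tc (state ++ [(r, c)]) = pvHeurA tc state + (if c = t then 1 else 0) := by
  rw [pvHeurA_append tc state r c, hget]

lemma pvFoldA_absorb (tc : List Int) (state : List (Int × Int)) (used : PySem.Set Int)
    (r t : Int) (hget : PySem.List.pyGet? tc r = some t)
    (cs : List Int) (acc : Option (Int × Int) × Int)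
    (hacc : acc.2 = pvHeurA tc state + 1) :
    cs.foldl (pvStepA tc state used r) acc = acc := by
  induction cs with
  | nil => rfl
  | cons c cs ih =>
    rw [List.foldl_cons]
    have hstep : pvStepA tc state used r acc c = acc := by
      unfold pvStepA
      split
      · rfl
      · rw [pvHeurA_append' tc state r c t hget, if_neg (by rw [hacc]; split <;> omega)]
    rw [hstep, ih]

-- fold from an accumulator at base: only an unused t can still improve
lemma pvFoldA_seek (tc : List Int) (state : List (Int × Int)) (used : PySem.Set Int)
    (r t : Int) (hget : PySem.List.pyGet? tc r = some t)
    (cs : List Int) (acc : Option (Int × Int) × Int)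
    (hacc : acc.2 = pvHeurA tc state) :
    cs.foldl (pvStepA tc state used r) acc =
      (if t ∈ cs.filter (fun c => !used.contains c) then
        (some (r, t), pvHeurA tc state + 1) else acc) := by
  induction cs generalizing acc with
  | nil => simp
  | cons c cs ih =>
    rw [List.foldl_cons]
    by_cases hc : used.contains c = true
    · have hc' : c ∈ used := by simpa using hc
      have hstep : pvStepA tc state used r acc c = acc := by
        unfold pvStepA; rw [if_pos hc]
      rw [hstep, ih acc hacc]
      simp [hc']
    · have hcf : used.contains c = false := by simpa using hc
      have hc' : c ∉ used := by simpa using hcf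
      by_cases hct : c = t
      · subst hct
        have hstep : pvStepA tc state used r acc c =
            (some (r, c), pvHeurA tc state + 1) := by
          unfold pvStepA
          rw [if_neg hc, pvHeurA_append' tc state r c c hget, if_pos rfl, if_pos (by omega)]
        rw [hstep, pvFoldA_absorb tc state used r c hget cs _ rfl]
        simp [hc']
      · have hstep : pvStepA tc state used r acc c = acc := by
          unfold pvStepA
          rw [if_neg hc, pvHeurA_append' tc state r c t hget, if_neg hct, add_zero,
            if_neg (by omega)]
        rw [hstep, ih acc hacc]
        simp only [List.filter_cons, hcf, Bool.not_false, if_true, List.mem_cons]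
        have : ¬ (t = c) := fun h => hct h.symm
        simp [this]

lemma pvFoldA_start (tc : List Int) (state : List (Int × Int)) (used : PySem.Set Int)
    (r t : Int) (hget : PySem.List.pyGet? tc r = some t)
    (cs : List Int) (c0 : Int) (P' : List Int)
    (hP : cs.filter (fun c => !used.contains c) = c0 :: P') :
    cs.foldl (pvStepA tc state used r) (none, -1) =
      (if t ∈ c0 :: P' then (some (r, t), pvHeurA tc state + 1)
       else (some (r, c0), pvHeurA tc state)) := by
  induction cs generalizing c0 P' with
  | nil => simp at hP
  | cons c cs ih =>
    rw [List.foldl_cons]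
    have hbase := pvHeurA_nonneg tc state
    by_cases hc : used.contains c = true
    · rw [List.filter_cons] at hP
      have hc' : ¬ ((!used.contains c) = true) := by rw [hc]; decide
      rw [if_neg hc'] at hP
      have hstep : pvStepA tc state used r (none, -1) c = (none, -1) := by
        unfold pvStepA; rw [if_pos hc]
      rw [hstep, ih _ _ hP]
    · have hcf : used.contains c = false := by simpa using hc
      rw [List.filter_cons] at hP
      have hc'' : ((!used.contains c) = true) := by rw [hcf]; decide
      rw [if_pos hc''] at hP
      injection hP with h1 h2
      subst h1
      by_cases hct : c = t
      · subst hct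
        have hstep : pvStepA tc state used r (none, -1) c =
            (some (r, c), pvHeurA tc state + 1) := by
          unfold pvStepA
          rw [if_neg hc, pvHeurA_append' tc state r c c hget, if_pos rfl, if_pos (by omega)]
        rw [hstep, pvFoldA_absorb tc state used r c hget cs _ rfl, if_pos (List.mem_cons_self ..)]
      · have hstep : pvStepA tc state used r (none, -1) c =
            (some (r, c), pvHeurA tc state) := by
          unfold pvStepA
          rw [if_neg hc, pvHeurA_append' tc state r c t hget, if_neg hct, add_zero,
            if_pos (by omega)]
        rw [hstep, pvFoldA_seek tc state used r t hget cs _ rfl, h2]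
        have hts : ¬ (t = c) := fun h => hct h.symm
        by_cases htP : t ∈ P'
        · rw [if_pos htP, if_pos (by simp [htP])]
        · rw [if_neg htP, if_neg (by simp [htP, hts])]

lemma pvInnerA_char (tc : List Int) (state : List (Int × Int)) (used : PySem.Set Int)
    (r t : Int) (hget : PySem.List.pyGet? tc r = some t)
    (c0 : Int) (P' : List Int)
    (hP : (PySem.List.pyRange 0 8 1).filter (fun c => !used.contains c) = c0 :: P') :
    (pvInnerA tc state used r).1 =
      some (r, if t ∈ c0 :: P' then t else c0) := by
  unfold pvInnerA
  rw [pvFoldA_start tc state used r t hget _ c0 P' hP]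
  by_cases h : t ∈ c0 :: P' <;> simp [h]

lemma pvFoldlMin_of_le (l : List Int) (x : Int) (h : ∀ y ∈ l, x ≤ y) :
    l.foldl min x = x := by
  induction l with
  | nil => rfl
  | cons a l ih =>
    rw [List.foldl_cons, min_eq_left (h a (List.mem_cons_self ..))]
    exact ih (fun y hy => h y (List.mem_cons_of_mem _ hy))

lemma pvMinUnusedB_eq_head (used : PySem.Set Int) (c0 : Int) (P' : List Int)
    (hP : (PySem.List.pyRange 0 8 1).filter (fun c => !used.contains c) = c0 :: P') :
    pvMinUnusedB used = c0 := by
  unfold pvMinUnusedB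
  rw [hP, PySem.List.min?_id_cons]
  have hpw : (c0 :: P').Pairwise (· < ·) := by
    rw [← hP]
    exact List.Pairwise.filter _ (PySem.List.pairwise_lt_pyRange_one 0 8)
  rw [pvFoldlMin_of_le P' c0 (fun y hy => le_of_lt ((List.pairwise_cons.mp hpw).1 y hy))]

lemma pvUnused_nonempty (used : PySem.Set Int) (hlen : used.length < 8) :
    (PySem.List.pyRange 0 8 1).filter (fun c => !used.contains c) ≠ [] := by
  intro hnil
  have hsub : PySem.List.pyRange 0 8 1 ⊆ used := by
    intro c hc
    by_contra hcu
    have : c ∈ (PySem.List.pyRange 0 8 1).filter (fun c => !used.contains c) := by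
      rw [List.mem_filter]
      exact ⟨hc, by simpa using hcu⟩
    rw [hnil] at this
    exact (List.not_mem_nil) this
  have h8 : (PySem.List.pyRange 0 8 1).length ≤ used.length :=
    List.Subperm.length_le (List.subperm_of_subset (PySem.List.nodup_pyRange_one 0 8) hsub)
  rw [PySem.List.length_pyRange_one] at h8
  omega

-- step facts shared by both loop lemmas are established inline below
lemma pvLoop_eq_case1 (tc : List Int) (hlen : 8 ≤ tc.length) :
    ∀ (d k : Nat), k + d = 8 →
      ∀ (state : List (Int × Int)) (used : PySem.Set Int) (buoc : List (List (Int × Int))),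
        state.length = k → used = state.map (fun p => p.2) → used.Nodup →
        (∀ x ∈ used, 0 ≤ x ∧ x < 8) → buoc = pvPrefixes state →
        pvLoopA tc (PySem.List.pyRange (k : Int) 8 1) state used buoc =
          pvLoopB tc (PySem.List.pyRange (k : Int) 8 1) state used buoc := by
  intro d
  induction d with
  | zero =>
    intro k hk state used buoc _ _ _ _ _
    rw [PySem.List.pyRange_one_eq_nil (by omega)]
    rfl
  | succ d ih =>
    intro k hk state used buoc hsl hu hnd hbd hbuoc
    have hk8 : (k : Int) < 8 := by omega
    rw [PySem.List.pyRange_one_cons hk8]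
    have hklt : k < tc.length := by omega
    have hne : state.map (fun p => p.2) ≠ tc := by
      intro h
      apply_fun List.length at h
      rw [List.length_map, hsl] at h
      omega
    have hget : PySem.List.pyGet? tc (k : Int) = some tc[k] := by
      rw [PySem.List.pyGet?_natCast, List.getElem?_eq_getElem hklt]
    obtain ⟨c0, P', hP⟩ :
        ∃ c0 P', (PySem.List.pyRange 0 8 1).filter (fun c => !used.contains c) = c0 :: P' := by
      rcases h : (PySem.List.pyRange 0 8 1).filter (fun c => !used.contains c) with _ | ⟨c0, P'⟩
      · exact absurd h (pvUnused_nonempty used (by rw [hu, List.length_map]; omega))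
      · exact ⟨c0, P', rfl⟩
    simp only [pvLoopA, pvLoopB]
    rw [pvInnerA_char tc state used (k : Int) tc[k] hget c0 P' hP]
    rw [if_neg hne, hget]
    simp only []
    have hmemP : ∀ x, x ∈ c0 :: P' → (0 ≤ x ∧ x < 8) ∧ used.contains x = false := by
      intro x hx
      rw [← hP, List.mem_filter, PySem.List.mem_pyRange_one] at hx
      exact ⟨hx.1, by simpa using hx.2⟩
    have hcol : (if tc[k] ∈ c0 :: P' then tc[k] else c0) =
        (if 0 ≤ tc[k] ∧ tc[k] < 8 ∧ used.contains tc[k] = false then tc[k]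
         else pvMinUnusedB used) := by
      by_cases hm : tc[k] ∈ c0 :: P'
      · rw [if_pos hm, if_pos (by rcases hmemP _ hm with ⟨⟨h1, h2⟩, h3⟩; exact ⟨h1, h2, h3⟩)]
      · rw [if_neg hm, if_neg, pvMinUnusedB_eq_head used c0 P' hP]
        intro ⟨h1, h2, h3⟩
        apply hm
        rw [← hP, List.mem_filter, PySem.List.mem_pyRange_one]
        exact ⟨⟨h1, h2⟩, by rw [h3]; decide⟩
    rw [hcol]
    have hcolP : (if 0 ≤ tc[k] ∧ tc[k] < 8 ∧ used.contains tc[k] = false then tc[k]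
         else pvMinUnusedB used) ∈ c0 :: P' := by
      rw [← hcol]
      by_cases hm : tc[k] ∈ c0 :: P'
      · rwa [if_pos hm]
      · rw [if_neg hm]; exact List.mem_cons_self ..
    set col := if 0 ≤ tc[k] ∧ tc[k] < 8 ∧ used.contains tc[k] = false then tc[k]
         else pvMinUnusedB used with hcoldef
    have hcolbd : 0 ≤ col ∧ col < 8 := (hmemP col hcolP).1
    have hcolnot : col ∉ used := by
      have := (hmemP col hcolP).2
      simpa using this
    have hadd : PySem.Set.add used col = used ++ [col] := by
      unfold PySem.Set.add PySem.Set.contains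
      rw [if_neg (by simpa using hcolnot)]
    rw [hadd]
    by_cases heq : (state ++ [((k : Int), col)]).map (fun p => p.2) = tc
    · have hlen1 : tc.length = k + 1 := by
        apply_fun List.length at heq
        simp [hsl] at heq
        omega
      rw [if_pos heq, pvEarlyRet_eq, hbuoc, pvPrefixes_append]
      rw [show ((k : Int) + 1) = (8 : Int) by omega]
      rfl
    · rw [if_neg heq]
      rw [show ((k : Int) + 1) = ((k + 1 : Nat) : Int) by push_cast; ring]
      exact ih (k + 1) (by omega) (state ++ [((k : Int), col)]) (used ++ [col])
        (buoc ++ [state ++ [((k : Int), col)]])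
        (by rw [List.length_append, hsl]; rfl)
        (by rw [hu, List.map_append]; rfl)
        (by rw [hu] at hnd hcolnot
            rw [hu, List.nodup_append]
            refine ⟨hnd, List.nodup_singleton _, ?_⟩
            intro x hx y hy
            simp at hy
            subst hy
            exact fun he => hcolnot (he ▸ hx))
        (by intro x hx
            rcases List.mem_append.mp hx with h | h
            · exact hbd x h
            · rw [List.mem_singleton] at h
              subst h
              exact hcolbd)
        (by rw [hbuoc, pvPrefixes_append])

lemma pvLoop_eq_case2 (tc : List Int) (hlen : tc.length < 8)
    (hbd : ∀ t ∈ tc, 0 ≤ t ∧ t < 8) (hnd : tc.Nodup) :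
    ∀ (d k : Nat), k + d = 8 → k < tc.length →
      ∀ (state : List (Int × Int)) (buoc : List (List (Int × Int))),
        state.length = k → state.map (fun p => p.2) = tc.take k →
        buoc = pvPrefixes state →
        pvLoopA tc (PySem.List.pyRange (k : Int) 8 1) state (tc.take k) buoc =
          pvLoopB tc (PySem.List.pyRange (k : Int) 8 1) state (tc.take k) buoc := by
  intro d
  induction d with
  | zero => intro k hk hklen; omega
  | succ d ih =>
    intro k hk hklen state buoc hsl hmap hbuoc
    have hk8 : (k : Int) < 8 := by omega
    rw [PySem.List.pyRange_one_cons hk8]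
    have hne : state.map (fun p => p.2) ≠ tc := by
      rw [hmap]
      intro h
      apply_fun List.length at h
      rw [List.length_take] at h
      omega
    have hget : PySem.List.pyGet? tc (k : Int) = some tc[k] := by
      rw [PySem.List.pyGet?_natCast, List.getElem?_eq_getElem hklen]
    have htbd : 0 ≤ tc[k] ∧ tc[k] < 8 := hbd _ (List.getElem_mem hklen)
    have htnot : tc[k] ∉ tc.take k := by
      intro hmem
      obtain ⟨i, hi, hieq⟩ := List.getElem_of_mem hmem
      rw [List.length_take] at hi
      rw [List.getElem_take] at hieq
      have : i = k := (List.Nodup.getElem_inj_iff hnd).mp hieq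
      omega
    have hulen : (tc.take k).length = k := by rw [List.length_take]; omega
    obtain ⟨c0, P', hP⟩ :
        ∃ c0 P', (PySem.List.pyRange 0 8 1).filter (fun c => !PySem.Set.contains (tc.take k) c) = c0 :: P' := by
      rcases h : (PySem.List.pyRange 0 8 1).filter (fun c => !PySem.Set.contains (tc.take k) c) with _ | ⟨c0, P'⟩
      · exact absurd h (pvUnused_nonempty (tc.take k) (by omega))
      · exact ⟨c0, P', rfl⟩
    have htP : tc[k] ∈ c0 :: P' := by
      rw [← hP, List.mem_filter, PySem.List.mem_pyRange_one]
      exact ⟨htbd, by simpa using htnot⟩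
    simp only [pvLoopA, pvLoopB]
    rw [pvInnerA_char tc state (tc.take k) (k : Int) tc[k] hget c0 P' hP]
    rw [if_neg hne, hget]
    simp only []
    rw [if_pos htP,
      if_pos (show 0 ≤ tc[k] ∧ tc[k] < 8 ∧ PySem.Set.contains (tc.take k) tc[k] = false from
        ⟨htbd.1, htbd.2, by simpa using htnot⟩)]
    have hadd : PySem.Set.add (tc.take k) tc[k] = tc.take k ++ [tc[k]] := by
      unfold PySem.Set.add PySem.Set.contains
      rw [if_neg (by simpa using htnot)]
    have htake1 : tc.take k ++ [tc[k]] = tc.take (k + 1) := by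
      rw [List.take_add_one, List.getElem?_eq_getElem hklen]
      rfl
    rw [hadd, htake1]
    have hmap1 : (state ++ [((k : Int), tc[k])]).map (fun p => p.2) = tc.take (k + 1) := by
      rw [List.map_append, hmap]
      exact htake1
    by_cases heq : (state ++ [((k : Int), tc[k])]).map (fun p => p.2) = tc
    · have hlen1 : tc.length = k + 1 := by
        apply_fun List.length at heq
        simpa [hsl] using heq.symm
      have hk17 : (k : Int) + 1 < 8 := by omega
      rw [if_pos heq, PySem.List.pyRange_one_cons hk17]
      simp only [pvLoopB]
      rw [if_pos heq, pvEarlyRet_eq, hbuoc, pvPrefixes_append]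
    · rw [if_neg heq]
      have hk1len : k + 1 < tc.length := by
        rcases Nat.lt_or_ge (k + 1) tc.length with h | h
        · exact h
        · exfalso
          apply heq
          rw [hmap1, List.take_of_length_le h]
      rw [show ((k : Int) + 1) = ((k + 1 : Nat) : Int) by push_cast; ring]
      exact ih (k + 1) (by omega) hk1len (state ++ [((k : Int), tc[k])])
        (buoc ++ [state ++ [((k : Int), tc[k])]])
        (by rw [List.length_append, hsl]; rfl) hmap1
        (by rw [hbuoc, pvPrefixes_append])

-- ===== VERDICT (by name: the statement is the Claim_ definition above) =====
theorem hill_climbing_timkiem_spec : Claim_equal_hill_climbing_timkiem := by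
  intro dich _ hpre
  unfold Spec_hill_climbing_timkiem hill_climbing_timkiem hill_climbing_timkiem_alt
  simp only []
  set tc := (PySem.List.sorted dich (fun x => x.1) false).map (fun p => p.2) with htc
  have hlen : tc.length = dich.length := by
    rw [htc, List.length_map, PySem.List.length_sorted]
  by_cases h8 : 8 ≤ tc.length
  · have := pvLoop_eq_case1 tc h8 8 0 rfl [] [] [[]] rfl rfl List.nodup_nil
      (by intro x hx; simp at hx) rfl
    simpa using this
  · rcases hpre with hp | ⟨hne, hbd, hnd⟩
    · omega
    · have hlt : tc.length < 8 := by omega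
      have hbd' : ∀ t ∈ tc, 0 ≤ t ∧ t < 8 := by
        intro t ht
        rw [htc, List.mem_map] at ht
        obtain ⟨p, hp, rfl⟩ := ht
        rw [PySem.List.mem_sorted] at hp
        exact hbd p hp
      have hnd' : tc.Nodup := by
        have hperm := (PySem.List.sorted_perm dich (fun x => x.1) false).map (fun p => p.2)
        exact hperm.nodup_iff.mpr hnd
      have hpos : 0 < tc.length := by
        rw [hlen]
        exact List.length_pos_of_ne_nil hne
      have := pvLoop_eq_case2 tc hlt hbd' hnd' 8 0 rfl (by omega) [] [[]] rfl (by simp) rfl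
      simpa using this
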